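-- pv_equiv track=rewrite | github.com/ethanasm/vacation-price-tracker | apps/worker/worker/activities/price_check.py | _filter_hotels
-- ===== SOURCE A (Python) =====
-- from typing import Any
--
-- VIEW_KEYWORDS = {
--     "ocean": ["ocean", "sea", "water", "beach"],
--     "city": ["city", "skyline", "urban"],
--     "garden": ["garden", "courtyard", "pool"],
-- }
--
-- def _filter_hotels(hotels: list[dict[str, Any]], prefs: dict[str, Any]) -> list[dict[str, Any]]:
--     filtered = hotels
--     preferred_room_types = [t.lower() for t in prefs.get("preferred_room_types", []) if isinstance(t, str)]
--     if preferred_room_types: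
--         filtered = [room for room in filtered if _matches_keywords(room.get("description"), preferred_room_types)]
--
--     preferred_views = [v.lower() for v in prefs.get("preferred_views", []) if isinstance(v, str)]
--     if preferred_views:
--         filtered = [room for room in filtered if _matches_view(room.get("description"), preferred_views)]
--
--     return filtered
--
-- def _matches_keywords(description: Any, keywords: list[str]) -> bool:
--     if not description or not isinstance(description, str):
--         return False
--     lower_desc = description.lower()
--     return any(keyword in lower_desc for keyword in keywords)
--
-- def _matches_view(description: Any, views: list[str]) -> bool:
--     if not description or not isinstance(description, str):
--         return False
--     lower_desc = description.lower()
--     for view in views: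
--         keywords = VIEW_KEYWORDS.get(view, [view])
--         if any(keyword in lower_desc for keyword in keywords):
--             return True
--     return False
-- ===== SOURCE B (Python) =====
-- VIEW_KEYWORDS = {
--     "ocean": ["ocean", "sea", "water", "beach"],
--     "city": ["city", "skyline", "urban"],
--     "garden": ["garden", "courtyard", "pool"],
-- }
--
-- def _filter_hotels(hotels, prefs):
--     room_kw = [t.lower() for t in prefs.get("preferred_room_types", []) if isinstance(t, str)]
--     views = [v.lower() for v in prefs.get("preferred_views", []) if isinstance(v, str)]
--     # expand the view vocabulary once, instead of looking VIEW_KEYWORDS up per room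
--     view_kw = [kw for v in views for kw in VIEW_KEYWORDS.get(v, [v])]
--
--     def keep(room):
--         desc = room.get("description")
--         if not desc or not isinstance(desc, str):
--             return not room_kw and not views
--         low = desc.lower()
--         return (not room_kw or any(k in low for k in room_kw)) and \
--                (not views or any(k in low for k in view_kw))
--
--     return [room for room in hotels if keep(room)]
-- ===== Notes on version B (the rewrite author's own statement) =====
-- stated objective: alternative
-- what changed: A makes two sequential filter passes and re-expands VIEW_KEYWORDS for every room; B pre-expands the view vocabulary into one flat keyword list and keeps each room in a single pass with one combined predicate.
import Mathlib
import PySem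

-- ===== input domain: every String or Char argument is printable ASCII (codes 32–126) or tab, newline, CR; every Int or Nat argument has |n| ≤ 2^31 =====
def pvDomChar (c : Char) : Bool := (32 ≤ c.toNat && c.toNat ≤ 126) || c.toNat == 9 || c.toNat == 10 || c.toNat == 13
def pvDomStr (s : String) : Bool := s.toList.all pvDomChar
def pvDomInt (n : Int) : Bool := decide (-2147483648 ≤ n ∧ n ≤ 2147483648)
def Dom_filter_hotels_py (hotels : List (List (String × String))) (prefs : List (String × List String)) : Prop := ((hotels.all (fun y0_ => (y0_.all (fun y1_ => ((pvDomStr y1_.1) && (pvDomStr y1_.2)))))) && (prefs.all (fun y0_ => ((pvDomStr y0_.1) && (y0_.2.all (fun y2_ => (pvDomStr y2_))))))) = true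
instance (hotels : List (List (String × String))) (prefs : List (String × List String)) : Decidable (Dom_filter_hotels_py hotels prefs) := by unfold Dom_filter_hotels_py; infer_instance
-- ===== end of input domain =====

-- ===== PORT A =====
-- B changes decomposition: A's two sequential filter passes with a per-room VIEW_KEYWORDS
-- lookup become one pass over a once-flattened view keyword list (objective: alternative).

-- dict (association list) lookup: first match, as in Python
def pvLookup {ν : Type} (d : List (String × ν)) (k : String) : Option ν :=
  match d with
  | [] => none
  | (k', v) :: rest => if k' = k then some v else pvLookup rest k

def pvViewKeywords : List (String × List String) :=
  [("ocean", ["ocean", "sea", "water", "beach"]),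
   ("city", ["city", "skyline", "urban"]),
   ("garden", ["garden", "courtyard", "pool"])]

-- _matches_keywords: 'not description' is true for a missing key or the empty string;
-- isinstance(description, str) is always true under the typing list[dict[str, str]]
def pvMatchesKeywords (description : Option String) (keywords : List String) : Bool :=
  match description with
  | none => false
  | some d =>
    if d = "" then false
    else keywords.any (fun keyword => PySem.Str.isIn keyword (PySem.Str.lower d))

-- _matches_view: the for-loop with early 'return True' is List.any over the views
def pvMatchesView (description : Option String) (views : List String) : Bool :=
  match description with
  | none => false
  | some d =>
    if d = "" then false
    else views.any (fun view =>
      ((pvLookup pvViewKeywords view).getD [view]).any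
        (fun keyword => PySem.Str.isIn keyword (PySem.Str.lower d)))

def filter_hotels_py (hotels : List (List (String × String))) (prefs : List (String × List String)) : List (List (String × String)) :=
  let filtered := hotels
  let preferred_room_types := ((pvLookup prefs "preferred_room_types").getD []).map PySem.Str.lower
  let filtered := if preferred_room_types.isEmpty then filtered
    else filtered.filter (fun room => pvMatchesKeywords (pvLookup room "description") preferred_room_types)
  let preferred_views := ((pvLookup prefs "preferred_views").getD []).map PySem.Str.lower
  let filtered := if preferred_views.isEmpty then filtered
    else filtered.filter (fun room => pvMatchesView (pvLookup room "description") preferred_views)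
  filtered

-- ===== PORT B =====
-- Source B's keep(room): one combined predicate over the precomputed keyword lists
def pvKeep (room_kw : List String) (views : List String) (view_kw : List String)
    (room : List (String × String)) : Bool :=
  match pvLookup room "description" with
  | none => room_kw.isEmpty && views.isEmpty
  | some desc =>
    if desc = "" then room_kw.isEmpty && views.isEmpty
    else
      let low := PySem.Str.lower desc
      (room_kw.isEmpty || room_kw.any (fun k => PySem.Str.isIn k low)) &&
      (views.isEmpty || view_kw.any (fun k => PySem.Str.isIn k low))

def filter_hotels_py_alt (hotels : List (List (String × String))) (prefs : List (String × List String)) : List (List (String × String)) :=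
  let room_kw := ((pvLookup prefs "preferred_room_types").getD []).map PySem.Str.lower
  let views := ((pvLookup prefs "preferred_views").getD []).map PySem.Str.lower
  let view_kw := views.flatMap (fun v => (pvLookup pvViewKeywords v).getD [v])
  hotels.filter (pvKeep room_kw views view_kw)

-- ===== PRECONDITION & SPEC =====

def Spec_filter_hotels_py (hotels : List (List (String × String))) (prefs : List (String × List String)) (out : List (List (String × String))) : Prop := out = filter_hotels_py_alt hotels prefs
instance (hotels : List (List (String × String))) (prefs : List (String × List String)) (out : List (List (String × String))) : Decidable (Spec_filter_hotels_py hotels prefs out) := by unfold Spec_filter_hotels_py; infer_instance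

-- ===== CLAIM (what is proved, stated in full; the proofs are below) =====
def Claim_equal_filter_hotels_py : Prop := ∀ (hotels : List (List (String × String))) (prefs : List (String × List String)), Dom_filter_hotels_py hotels prefs → Spec_filter_hotels_py hotels prefs (filter_hotels_py hotels prefs)

-- ===== LEMMAS AND PROOFS =====

-- ===== VERDICT (by name: the statement is the Claim_ definition above) =====
-- keep's value, written as the conjunction of the two single-pass tests
lemma pvKeep_eq (rk vs vk : List String) (room : List (String × String)) :
    pvKeep rk vs vk room =
      ((rk.isEmpty || pvMatchesKeywords (pvLookup room "description") rk) &&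
       (vs.isEmpty || (match pvLookup room "description" with
         | none => false
         | some d => if d = "" then false
           else vk.any (fun k => PySem.Str.isIn k (PySem.Str.lower d))))) := by
  unfold pvKeep pvMatchesKeywords
  cases pvLookup room "description" with
  | none => simp
  | some d => by_cases hd : d = "" <;> simp [hd]

-- flattening the per-view keyword lists preserves the view match
lemma pvMatchesView_flat (vs : List String) (desc : Option String) :
    pvMatchesView desc vs =
      (match desc with
       | none => false
       | some d => if d = "" then false
         else (vs.flatMap (fun v => (pvLookup pvViewKeywords v).getD [v])).any
           (fun k => PySem.Str.isIn k (PySem.Str.lower d))) := by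
  unfold pvMatchesView
  cases desc with
  | none => rfl
  | some d => by_cases hd : d = "" <;> simp [hd, List.any_flatMap]

theorem filter_hotels_py_spec : Claim_equal_filter_hotels_py := by
  intro hotels prefs _
  unfold Spec_filter_hotels_py filter_hotels_py filter_hotels_py_alt
  simp only []
  set rk := ((pvLookup prefs "preferred_room_types").getD []).map PySem.Str.lower with hrk
  set vs := ((pvLookup prefs "preferred_views").getD []).map PySem.Str.lower with hvs
  set vk := vs.flatMap (fun v => (pvLookup pvViewKeywords v).getD [v]) with hvk
  have hkeep : ∀ room, pvKeep rk vs vk room =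
      ((rk.isEmpty || pvMatchesKeywords (pvLookup room "description") rk) &&
       (vs.isEmpty || pvMatchesView (pvLookup room "description") vs)) := by
    intro room
    rw [pvKeep_eq, pvMatchesView_flat]
  by_cases hrkE : rk.isEmpty = true <;> by_cases hvsE : vs.isEmpty = true
  · -- both preference lists empty: keep is constantly true
    rw [if_pos hrkE, if_pos hvsE]
    exact (List.filter_eq_self.mpr (fun room _ => by rw [hkeep room, hrkE, hvsE]; rfl)).symm
  · -- only views given
    rw [if_pos hrkE, if_neg hvsE]
    exact (List.filter_congr (fun room _ => by
      rw [hkeep room, hrkE, Bool.eq_false_iff.mpr hvsE]; simp)).symm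
  · -- only room types given
    rw [if_neg hrkE, if_pos hvsE]
    exact (List.filter_congr (fun room _ => by
      rw [hkeep room, hvsE, Bool.eq_false_iff.mpr hrkE]; simp)).symm
  · -- both given: two sequential passes = one pass with the conjunction
    rw [if_neg hrkE, if_neg hvsE, List.filter_filter]
    exact (List.filter_congr (fun room _ => by
      rw [hkeep room, Bool.eq_false_iff.mpr hrkE, Bool.eq_false_iff.mpr hvsE]
      simp [Bool.and_comm])).symm
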